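-- pv_equiv track=rewrite | github.com/ckopec-dev/Euler-Gen3 | 86.py | solve
-- ===== SOURCE A (Python) =====
-- import math
--
-- def solve(target=1_000_000):
--     count = 0
--     M = 0
--
--     while count <= target:
--         M += 1
--         c = M
--
--         # s = a + b, ranges from 2 (min: a=b=1) to 2c (max: a=b=c)
--         for s in range(2, 2 * c + 1):
--             val = s * s + c * c
--             sq = int(math.isqrt(val))
--
--             if sq * sq == val:  # perfect square — integer path length!
--                 # Count pairs (a, b) with a <= b <= c and a + b = s
--                 # a <= b        =>  a <= s // 2
--                 # b <= c        =>  s - a <= c  =>  a >= s - c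
--                 lo = max(1, s - c)
--                 hi = s // 2
--                 if hi >= lo:
--                     count += hi - lo + 1
--
--     return M
-- ===== SOURCE B (Python) =====
-- import math
--
-- def solve(target=1_000_000):
--     # counts[i] = number of integer-shortest-path cuboids whose largest side is i + 1
--     counts = []
--
--     def fill(n):
--         # extend the table of per-size counts up to length n
--         while len(counts) < n:
--             c = len(counts) + 1
--             t = 0
--             for s in range(2, 2 * c + 1):
--                 val = s * s + c * c
--                 sq = math.isqrt(val)
--                 if sq * sq == val:
--                     lo = max(1, s - c)
--                     hi = s // 2
--                     if hi >= lo: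
--                         t += hi - lo + 1
--             counts.append(t)
--
--     def total(m):
--         # cumulative number of solutions with largest side at most m
--         fill(m)
--         return sum(counts[:m])
--
--     if target < 0:
--         return 0
--     # find the least M with total(M) > target: gallop for an upper bound, then bisect
--     hi = 1
--     while total(hi) <= target:
--         hi *= 2
--     lo = 0
--     while hi - lo > 1:
--         mid = (lo + hi) // 2
--         if total(mid) <= target:
--             lo = mid
--         else:
--             hi = mid
--     return hi
-- ===== Notes on version B (the rewrite author's own statement) =====
-- stated objective: alternative
-- what changed: B reformulates the problem as finding the least M whose cumulative solution count exceeds the target and locates it by exponential galloping plus binary search over a memoized table of per-size counts, instead of A's single incremental while-loop that accumulates the count M by M.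
import Mathlib
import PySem

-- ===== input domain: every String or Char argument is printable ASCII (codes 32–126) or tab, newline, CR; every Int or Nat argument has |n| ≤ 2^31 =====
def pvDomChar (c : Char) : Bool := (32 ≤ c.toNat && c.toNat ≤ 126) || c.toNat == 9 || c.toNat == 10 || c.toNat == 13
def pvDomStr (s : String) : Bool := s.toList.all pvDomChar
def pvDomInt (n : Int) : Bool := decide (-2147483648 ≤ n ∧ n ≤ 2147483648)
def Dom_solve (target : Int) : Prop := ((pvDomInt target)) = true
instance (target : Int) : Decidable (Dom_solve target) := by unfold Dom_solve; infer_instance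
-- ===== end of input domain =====

-- B finds the least M whose cumulative solution count exceeds the target by exponential
-- galloping plus binary search over a memoized table of per-size counts, instead of A's
-- incremental while-loop accumulating the count M by M.

-- ===== PORT A =====
-- math.isqrt, exact for n ≥ 0 (every argument here is s*s + c*c ≥ 0)
def isqrtPy (n : Int) : Int := Int.ofNat (Nat.sqrt n.toNat)

-- inner 'for s in range(2, 2*c+1)' loop of A
def solveInnerA (c count : Int) : Int :=
  (PySem.List.pyRange 2 (2 * c + 1) 1).foldl (fun count s =>
    let val := s * s + c * c
    let sq := isqrtPy val
    if sq * sq = val then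
      let lo := max 1 (s - c)
      let hi := PySem.Int.floordiv s 2
      if hi ≥ lo then count + (hi - lo + 1) else count
    else count) count

-- the 'while count <= target' loop; the fuel is only a totality guard: every c divisible
-- by 3 contributes at least one solution (s = 4c/3), so count exceeds target within
-- 3*(target+1) iterations and the fuel (3*(target+2)).toNat is never exhausted.
def solveLoopA (target : Int) : Nat → Int → Int → Int
  | 0, _, M => M
  | fuel + 1, count, M =>
      if count ≤ target then solveLoopA target fuel (solveInnerA (M + 1) count) (M + 1) else M

def solve (target : Int) : Int := solveLoopA target (3 * (target + 2)).toNat 0 0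

-- ===== PORT B =====
-- body of fill's while loop: the per-size count for largest side c ('t' accumulated over s)
def gB (c : Int) : Int :=
  (PySem.List.pyRange 2 (2 * c + 1) 1).foldl (fun t s =>
    let val := s * s + c * c
    let sq := isqrtPy val
    if sq * sq = val then
      let lo := max 1 (s - c)
      let hi := PySem.Int.floordiv s 2
      if hi ≥ lo then t + (hi - lo + 1) else t
    else t) 0

-- fill(n): 'while len(counts) < n: counts.append(...)'
def fillB (n : Nat) (counts : List Int) : List Int :=
  if h : counts.length < n then fillB n (counts ++ [gB ((counts.length : Int) + 1)]) else counts
termination_by n - counts.length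
decreasing_by simp only [List.length_append, List.length_cons, List.length_nil]; omega

-- total(m): fill(m); sum(counts[:m]); the cache list is threaded as state
-- (m ≥ 1 at every call, so '.toNat' for the length comparison and the slice is exact)
def totalB (m : Int) (counts : List Int) : Int × List Int :=
  let counts := fillB m.toNat counts
  ((counts.take m.toNat).sum, counts)

-- 'hi = 1; while total(hi) <= target: hi *= 2'; the fuel is only a totality guard:
-- within the |target| ≤ 2^31 domain the cumulative count exceeds target long before
-- hi reaches 2^100, so the fuel 100 is never exhausted there.
def gallopB (target : Int) : Nat → Int → List Int → Int × List Int
  | 0, hi, counts => (hi, counts)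
  | fuel + 1, hi, counts =>
      let p := totalB hi counts
      if p.1 ≤ target then gallopB target fuel (hi * 2) p.2 else (hi, p.2)

-- 'while hi - lo > 1: mid = (lo + hi) // 2; ...'
def bsearchB (target lo hi : Int) (counts : List Int) : Int :=
  if h : hi - lo > 1 then
    let mid := PySem.Int.floordiv (lo + hi) 2
    let p := totalB mid counts
    if p.1 ≤ target then bsearchB target mid hi p.2 else bsearchB target lo mid p.2
  else hi
termination_by (hi - lo).toNat
decreasing_by
  · have hm : PySem.Int.floordiv (lo + hi) 2 = (lo + hi) / 2 :=
      PySem.Int.floordiv_eq_ediv_of_pos (by omega)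
    simp only [hm]; omega
  · have hm : PySem.Int.floordiv (lo + hi) 2 = (lo + hi) / 2 :=
      PySem.Int.floordiv_eq_ediv_of_pos (by omega)
    simp only [hm]; omega

def solve_alt (target : Int) : Int :=
  if target < 0 then 0
  else
    let r := gallopB target 100 1 []
    bsearchB target 0 r.1 r.2

-- ===== PRECONDITION & SPEC =====
def Spec_solve (target : Int) (out : Int) : Prop := out = solve_alt target
instance (target : Int) (out : Int) : Decidable (Spec_solve target out) := by unfold Spec_solve; infer_instance

-- ===== CLAIM (what is proved, stated in full; the proofs are below) =====
def Claim_equal_solve : Prop := ∀ (target : Int), Dom_solve target → Spec_solve target (solve target)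

-- ===== LEMMAS AND PROOFS =====

-- A's per-sum contribution
def tA (c s : Int) : Int :=
  if isqrtPy (s * s + c * c) * isqrtPy (s * s + c * c) = s * s + c * c then
    (if PySem.Int.floordiv s 2 ≥ max 1 (s - c) then PySem.Int.floordiv s 2 - max 1 (s - c) + 1 else 0)
  else 0

-- the per-size count as a sum, and the cumulative count
noncomputable def gsum (c : Int) : Int := ∑ s ∈ Finset.Icc 2 (2 * c), tA c s
noncomputable def Fc (m : Int) : Int := ∑ c ∈ Finset.Icc 1 m, gsum c

-- list sum over pyRange a b 1 as a Finset.Icc sum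
lemma sum_map_pyRange (t : Int → Int) : ∀ (n : Nat) (a : Int),
    ((PySem.List.pyRange a (a + n) 1).map t).sum = ∑ s ∈ Finset.Icc a (a + (n : Int) - 1), t s := by
  intro n
  induction n with
  | zero =>
      intro a
      rw [PySem.List.pyRange_one_eq_nil (by omega)]
      rw [show Finset.Icc a (a + ((0:Nat):Int) - 1) = ∅ by
        apply Finset.Icc_eq_empty; intro h; push_cast at h; omega]
      simp
  | succ n ih =>
      intro a
      have h1 : a + ((n + 1 : Nat) : Int) = (a + (n : Int)) + 1 := by push_cast; ring
      rw [h1, PySem.List.pyRange_one_succ_right (by omega), List.map_append, List.sum_append,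
        ih a]
      rw [show Finset.Icc a (a + (n : Int) + 1 - 1) =
          insert (a + (n : Int)) (Finset.Icc a (a + (n : Int) - 1)) from by
        ext x; simp only [Finset.mem_Icc, Finset.mem_insert]; omega]
      rw [Finset.sum_insert (by simp only [Finset.mem_Icc]; omega)]
      simp [add_comm]

lemma sum_map_pyRange' (t : Int → Int) (a b : Int) (h : a ≤ b + 1) :
    ((PySem.List.pyRange a (b + 1) 1).map t).sum = ∑ s ∈ Finset.Icc a b, t s := by
  have h0 := sum_map_pyRange t (b + 1 - a).toNat a
  rw [show a + (((b + 1 - a).toNat : Nat) : Int) = b + 1 from by omega] at h0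
  rw [show b + 1 - 1 = b from by ring] at h0
  exact h0

-- A's inner loop as a Finset sum
lemma innerA_sum (c count : Int) : solveInnerA c count = count + gsum c := by
  unfold solveInnerA gsum
  have hf : (fun (count s : Int) =>
      let val := s * s + c * c
      let sq := isqrtPy val
      if sq * sq = val then
        let lo := max 1 (s - c)
        let hi := PySem.Int.floordiv s 2
        if hi ≥ lo then count + (hi - lo + 1) else count
      else count) = fun count s => count + tA c s := by
    funext cnt s
    simp only [tA]
    split_ifs <;> ring
  by_cases hc : 1 ≤ c
  · rw [hf, PySem.List.foldl_add, sum_map_pyRange' (tA c) 2 (2 * c) (by omega)]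
  · rw [PySem.List.pyRange_one_eq_nil (by omega),
      show Finset.Icc 2 (2 * c) = ∅ by apply Finset.Icc_eq_empty; omega]
    simp

lemma gB_eq (c : Int) : gB c = gsum c := by
  have h : gB c = solveInnerA c 0 := rfl
  rw [h, innerA_sum, zero_add]

lemma tA_nonneg (c s : Int) : 0 ≤ tA c s := by
  unfold tA; split_ifs <;> omega

lemma gsum_nonneg (c : Int) : 0 ≤ gsum c :=
  Finset.sum_nonneg fun s _ => tA_nonneg c s

lemma Fc_zero : Fc 0 = 0 := by
  unfold Fc
  rw [show Finset.Icc (1:Int) 0 = ∅ by apply Finset.Icc_eq_empty; omega]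
  simp

lemma Fc_succ (m : Int) (hm : 0 ≤ m) : Fc (m + 1) = Fc m + gsum (m + 1) := by
  unfold Fc
  rw [show Finset.Icc (1:Int) (m + 1) = insert (m + 1) (Finset.Icc 1 m) from by
    ext x; simp only [Finset.mem_Icc, Finset.mem_insert]; omega]
  rw [Finset.sum_insert (by simp only [Finset.mem_Icc]; omega)]
  ring

lemma Fc_mono {a b : Int} (h : a ≤ b) : Fc a ≤ Fc b := by
  unfold Fc
  apply Finset.sum_le_sum_of_subset_of_nonneg
  · exact Finset.Icc_subset_Icc_right h
  · intro c _ _; exact gsum_nonneg c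

-- isqrt of a perfect square
lemma isqrt_sq (a : Int) (ha : 0 ≤ a) : isqrtPy (a * a) = a := by
  unfold isqrtPy
  rw [show a = ((a.toNat : Nat) : Int) from (Int.toNat_of_nonneg ha).symm]
  rw [← Int.natCast_mul, Int.toNat_natCast, ← pow_two, Nat.sqrt_eq']
  rfl

-- every size divisible by 3 contributes at least one solution (s = 4c/3)
lemma gsum_triple (j : Int) (hj : 1 ≤ j) : 1 ≤ gsum (3 * j) := by
  have hmem : (4 * j) ∈ Finset.Icc (2:Int) (2 * (3 * j)) := by
    simp only [Finset.mem_Icc]; omega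
  have hsingle := Finset.single_le_sum (f := tA (3 * j))
    (fun s _ => tA_nonneg (3 * j) s) hmem
  have hval : tA (3 * j) (4 * j) = j + 1 := by
    unfold tA
    rw [show (4 * j) * (4 * j) + (3 * j) * (3 * j) = (5 * j) * (5 * j) from by ring]
    rw [isqrt_sq (5 * j) (by omega)]
    rw [if_pos rfl]
    have hfd : PySem.Int.floordiv (4 * j) 2 = (4 * j) / 2 :=
      PySem.Int.floordiv_eq_ediv_of_pos (by omega)
    rw [hfd]
    rw [show max 1 (4 * j - 3 * j) = j from by omega]
    rw [if_pos (by omega)]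
    omega
  unfold gsum
  rw [hval] at hsingle
  omega

-- the cumulative count grows without bound
lemma Fc_lb : ∀ (k : Nat), (k : Int) ≤ Fc (3 * k) := by
  intro k
  induction k with
  | zero => simp [Fc_zero]
  | succ k ih =>
      have h1 : Fc (3 * (k:Int) + 1) = Fc (3 * k) + gsum (3 * k + 1) := Fc_succ _ (by omega)
      have h2 : Fc (3 * (k:Int) + 2) = Fc (3 * k + 1) + gsum (3 * k + 2) := by
        have := Fc_succ (3 * (k:Int) + 1) (by omega)
        rw [show 3 * (k:Int) + 1 + 1 = 3 * k + 2 from by ring] at this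
        exact this
      have h3 : Fc (3 * (k:Int) + 3) = Fc (3 * k + 2) + gsum (3 * k + 3) := by
        have := Fc_succ (3 * (k:Int) + 2) (by omega)
        rw [show 3 * (k:Int) + 2 + 1 = 3 * k + 3 from by ring] at this
        exact this
      have htr : 1 ≤ gsum (3 * ((k:Int) + 1)) := gsum_triple _ (by omega)
      rw [show (3:Int) * ((k:Int) + 1) = 3 * k + 3 from by ring] at htr
      have hg1 := gsum_nonneg (3 * (k:Int) + 1)
      have hg2 := gsum_nonneg (3 * (k:Int) + 2)
      have hcast : ((k + 1 : Nat) : Int) = (k : Int) + 1 := by push_cast; ring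
      rw [hcast, show (3:Int) * ((k:Int) + 1) = 3 * k + 3 from by ring, h3, h2, h1]
      omega

-- A's loop, run from cumulative state (Fc M, M), lands exactly on N
lemma loopA_run (target N : Int) (hN1 : target < Fc N)
    (hN2 : ∀ m, 0 ≤ m → m < N → Fc m ≤ target) :
    ∀ (fuel : Nat) (M : Int), 0 ≤ M → M ≤ N → N ≤ M + fuel →
      solveLoopA target fuel (Fc M) M = N := by
  intro fuel
  induction fuel with
  | zero =>
      intro M h0 h1 h2
      simp only [solveLoopA]
      omega
  | succ fuel ih =>
      intro M h0 h1 h2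
      simp only [solveLoopA]
      by_cases hg : Fc M ≤ target
      · rw [if_pos hg]
        have hMN : M < N := by
          rcases lt_or_eq_of_le h1 with h | h
          · exact h
          · subst h; omega
        have hstep : solveInnerA (M + 1) (Fc M) = Fc (M + 1) := by
          rw [innerA_sum, Fc_succ M h0]
        rw [hstep]
        exact ih (M + 1) (by omega) (by omega) (by push_cast at h2 ⊢; omega)
      · rw [if_neg hg]
        have : ¬ M < N := fun h => hg (hN2 M h0 h)
        omega

-- the memo table is always a correct prefix of the per-size counts
def CacheOK (counts : List Int) : Prop :=
  counts = (List.range counts.length).map (fun (i : Nat) => gsum ((i : Int) + 1))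

lemma cache_step (counts : List Int) (hc : CacheOK counts) :
    CacheOK (counts ++ [gB ((counts.length : Int) + 1)]) := by
  unfold CacheOK at hc ⊢
  rw [show (counts ++ [gB ((counts.length : Int) + 1)]).length = counts.length + 1 from by simp]
  rw [List.range_succ, List.map_append, gB_eq, ← hc]
  simp

lemma fill_spec : ∀ (k n : Nat) (counts : List Int), n - counts.length ≤ k → CacheOK counts →
    CacheOK (fillB n counts) ∧ n ≤ (fillB n counts).length := by
  intro k
  induction k with
  | zero =>
      intro n counts hk hc
      rw [fillB, dif_neg (by omega)]
      exact ⟨hc, by omega⟩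
  | succ k ih =>
      intro n counts hk hc
      rw [fillB]
      split_ifs with h
      · exact ih n _ (by simp only [List.length_append, List.length_cons, List.length_nil]; omega)
          (cache_step counts hc)
      · exact ⟨hc, by omega⟩

lemma sum_range_gsum : ∀ (j : Nat),
    ((List.range j).map (fun (i : Nat) => gsum ((i : Int) + 1))).sum = Fc (j : Int) := by
  intro j
  induction j with
  | zero => simp [Fc_zero]
  | succ j ih =>
      rw [List.range_succ, List.map_append, List.sum_append, ih]
      push_cast
      rw [Fc_succ (j : Int) (by omega)]
      simp

lemma total_spec (m : Int) (counts : List Int) (hm : 0 ≤ m) (hc : CacheOK counts) :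
    totalB m counts = (Fc m, fillB m.toNat counts) ∧ CacheOK (fillB m.toNat counts) := by
  obtain ⟨hc', hlen⟩ := fill_spec m.toNat m.toNat counts (by omega) hc
  refine ⟨?_, hc'⟩
  simp only [totalB]
  have hval : ((fillB m.toNat counts).take m.toNat).sum = Fc m := by
    nth_rewrite 1 [hc']
    rw [← List.map_take, List.take_range]
    rw [Nat.min_eq_left hlen]
    rw [sum_range_gsum]
    rw [Int.toNat_of_nonneg hm]
  rw [hval]

-- galloping returns a cached upper bound whose cumulative count exceeds the target
lemma gallop_run (target : Int) : ∀ (fuel : Nat) (hi : Int) (counts : List Int),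
    CacheOK counts → 1 ≤ hi → target < Fc (hi * 2 ^ fuel) →
    CacheOK (gallopB target fuel hi counts).2 ∧ 1 ≤ (gallopB target fuel hi counts).1 ∧
      target < Fc (gallopB target fuel hi counts).1 := by
  intro fuel
  induction fuel with
  | zero =>
      intro hi counts hc hhi hlt
      simp only [gallopB]
      rw [pow_zero, mul_one] at hlt
      exact ⟨hc, hhi, hlt⟩
  | succ fuel ih =>
      intro hi counts hc hhi hlt
      simp only [gallopB]
      obtain ⟨heq, hc'⟩ := total_spec hi counts (by omega) hc
      rw [heq]
      dsimp only
      by_cases hg : Fc hi ≤ target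
      · rw [if_pos hg]
        exact ih (hi * 2) _ hc' (by omega)
          (by rw [show hi * 2 * 2 ^ fuel = hi * 2 ^ (fuel + 1) from by rw [pow_succ]; ring]
              exact hlt)
      · rw [if_neg hg]
        exact ⟨hc', hhi, by show target < Fc hi; omega⟩

-- binary search on the monotone cumulative count lands exactly on N
lemma bsearch_run (target N : Int) (hN1 : target < Fc N)
    (hN2 : ∀ m, 0 ≤ m → m < N → Fc m ≤ target) :
    ∀ (k : Nat) (lo hi : Int) (counts : List Int), (hi - lo).toNat ≤ k → CacheOK counts →
      0 ≤ lo → lo < hi → Fc lo ≤ target → target < Fc hi →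
      bsearchB target lo hi counts = N := by
  intro k
  induction k with
  | zero => intro lo hi counts hk _ _ hlh _ _; exfalso; omega
  | succ k ih =>
      intro lo hi counts hk hc h0 hlh hFlo hFhi
      rw [bsearchB]
      split_ifs with h
      · dsimp only
        have hmid : PySem.Int.floordiv (lo + hi) 2 = (lo + hi) / 2 :=
          PySem.Int.floordiv_eq_ediv_of_pos (by omega)
        have hb : lo + 1 ≤ PySem.Int.floordiv (lo + hi) 2 ∧
            PySem.Int.floordiv (lo + hi) 2 ≤ hi - 1 := by rw [hmid]; omega
        obtain ⟨heq, hc'⟩ := total_spec (PySem.Int.floordiv (lo + hi) 2) counts (by omega) hc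
        rw [heq]
        dsimp only
        split_ifs with hg
        · exact ih (PySem.Int.floordiv (lo + hi) 2) hi (fillB (PySem.Int.floordiv (lo + hi) 2).toNat counts)
            (by omega) hc' (by omega) (by omega) hg hFhi
        · exact ih lo (PySem.Int.floordiv (lo + hi) 2) (fillB (PySem.Int.floordiv (lo + hi) 2).toNat counts)
            (by omega) hc' h0 (by omega) hFlo (by omega)
      · -- hi = lo + 1: hi is the least bound with Fc hi > target, hence hi = N
        have hhi : hi = lo + 1 := by omega
        by_contra hne
        rcases lt_or_gt_of_ne hne with hlt | hgt
        · have : Fc hi ≤ target := hN2 hi (by omega) hlt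
          omega
        · have : Fc N ≤ Fc lo := Fc_mono (by omega)
          have : Fc N ≤ target := le_trans this hFlo
          omega

-- A returns 0 straight away on a negative target
lemma loopA_neg (target : Int) (ht : target < 0) :
    ∀ fuel, solveLoopA target fuel 0 0 = 0 := by
  intro fuel
  cases fuel with
  | zero => rfl
  | succ fuel => simp only [solveLoopA]; rw [if_neg (by omega)]

-- ===== VERDICT (by name: the statement is the Claim_ definition above) =====
theorem solve_spec : Claim_equal_solve := by
  intro target hdom
  unfold Spec_solve solve solve_alt
  by_cases ht0 : target < 0
  · rw [if_pos ht0, loopA_neg target ht0]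
  · rw [if_neg ht0]
    push_neg at ht0
    have hd : -2147483648 ≤ target ∧ target ≤ 2147483648 := by
      unfold Dom_solve pvDomInt at hdom
      exact of_decide_eq_true hdom
    -- the least N with Fc N > target exists
    have hex : ∃ k : Nat, target < Fc (k : Int) := by
      refine ⟨3 * (target.toNat + 1), ?_⟩
      have h1 := Fc_lb (target.toNat + 1)
      rw [show ((3 * (target.toNat + 1) : Nat) : Int) = 3 * ((target.toNat + 1 : Nat) : Int) from by
        push_cast; ring]
      omega
    set N : Int := ((Nat.find hex : Nat) : Int) with hN
    have hN1 : target < Fc N := by rw [hN]; exact Nat.find_spec hex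
    have hN2 : ∀ m, 0 ≤ m → m < N → Fc m ≤ target := by
      intro m hm0 hmN
      have hmn : m.toNat < Nat.find hex := by omega
      have hmin := Nat.find_min hex hmn
      rw [show ((m.toNat : Nat) : Int) = m from by omega] at hmin
      omega
    have hN3 : N ≤ 3 * (target + 1) := by
      have hle : Nat.find hex ≤ 3 * (target.toNat + 1) := by
        apply Nat.find_le
        have h1 := Fc_lb (target.toNat + 1)
        rw [show ((3 * (target.toNat + 1) : Nat) : Int) = 3 * ((target.toNat + 1 : Nat) : Int) from by
          push_cast; ring]
        omega
      have hcast : ((3 * (target.toNat + 1) : Nat) : Int) = 3 * ((target.toNat : Int) + 1) := by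
        push_cast; ring
      rw [hN]
      calc ((Nat.find hex : Nat) : Int) ≤ ((3 * (target.toNat + 1) : Nat) : Int) := by exact_mod_cast hle
        _ = 3 * ((target.toNat : Int) + 1) := hcast
        _ = 3 * (target + 1) := by rw [Int.toNat_of_nonneg ht0]
    -- A lands on N
    have hA : solveLoopA target (3 * (target + 2)).toNat 0 0 = N := by
      have h := loopA_run target N hN1 hN2 (3 * (target + 2)).toNat 0 (le_refl 0)
        (by omega) (by omega)
      rwa [Fc_zero] at h
    -- B: gallop for an upper bound, then bisect; both land on N
    have hp : (2 : Int) ^ (100 : Nat) = 1267650600228229401496703205376 := by norm_num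
    have hbig : target < Fc (1 * 2 ^ (100 : Nat)) := by
      refine lt_of_lt_of_le hN1 (Fc_mono ?_)
      rw [one_mul, hp]
      omega
    have hcache0 : CacheOK ([] : List Int) := by unfold CacheOK; rfl
    obtain ⟨hcache, hge1, hlt⟩ := gallop_run target 100 1 [] hcache0 (by omega) hbig
    have hB : bsearchB target 0 (gallopB target 100 1 []).1 (gallopB target 100 1 []).2 = N := by
      refine bsearch_run target N hN1 hN2 ((gallopB target 100 1 []).1).toNat 0
        (gallopB target 100 1 []).1 (gallopB target 100 1 []).2 (by omega) hcache (le_refl 0)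
        (by omega) (by rw [Fc_zero]; exact ht0) hlt
    show solveLoopA target (3 * (target + 2)).toNat 0 0 =
      bsearchB target 0 (gallopB target 100 1 []).1 (gallopB target 100 1 []).2
    rw [hA, hB]
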